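-- pv_equiv track=rewrite | github.com/NLPatVCU/NER-OUS | agent.py | get_annotation
-- ===== SOURCE A (Python) =====
-- def get_annotation(sentence_array, start_index):
--     if start_index >= len(sentence_array):
--         return None, None, None
--
--     start, end, tag = -1, -1, ''
--
--     for j in range(start_index, len(sentence_array)):
--         if start > -1:
--             if sentence_array[j][1] == tag:
--                 continue
--             else:
--                 end = j-1
--                 return start, end, tag
--         else:
--             if not sentence_array[j][1] == '':
--                 start = j
--                 tag = sentence_array[j][1]
--
--     if start > -1:
--         return start, len(sentence_array)-1, tag
--     else:
--         return None, None, None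
-- ===== SOURCE B (Python) =====
-- def get_annotation(sentence_array, start_index):
--     # Run-length encode the tag column once: runs of (tag, count).
--     runs = []
--     for _, t in sentence_array:
--         if runs and runs[-1][0] == t:
--             runs[-1] = (t, runs[-1][1] + 1)
--         else:
--             runs.append((t, 1))
--     # Walk the runs, tracking the absolute position of each run.
--     i = max(start_index, 0)
--     pos = 0
--     for tag, cnt in runs:
--         if pos + cnt > i:
--             if tag != '':
--                 return i, pos + cnt - 1, tag
--             i = pos + cnt
--         pos += cnt
--     return None, None, None
-- ===== Notes on version B (the rewrite author's own statement) =====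
-- stated objective: alternative
-- what changed: Replaces A's flag-driven index scan with -1 sentinels by a run-length encoding of the tag column (one pass building (tag,count) runs) followed by a walk over the runs that locates the run covering the start index and reads the answer off run boundaries.
import Mathlib
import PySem

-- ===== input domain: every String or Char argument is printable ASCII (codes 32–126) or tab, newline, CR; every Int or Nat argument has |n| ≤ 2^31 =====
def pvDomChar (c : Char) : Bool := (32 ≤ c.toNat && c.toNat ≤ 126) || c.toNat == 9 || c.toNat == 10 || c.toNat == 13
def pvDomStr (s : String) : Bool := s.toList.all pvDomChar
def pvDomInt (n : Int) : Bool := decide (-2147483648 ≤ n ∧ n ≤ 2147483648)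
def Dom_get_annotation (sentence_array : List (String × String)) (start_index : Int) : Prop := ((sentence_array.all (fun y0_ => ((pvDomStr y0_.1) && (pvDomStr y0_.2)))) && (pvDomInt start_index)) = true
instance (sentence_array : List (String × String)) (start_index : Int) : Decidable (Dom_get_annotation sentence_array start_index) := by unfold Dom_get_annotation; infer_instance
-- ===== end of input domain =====

-- B replaces A's flag-driven single scan (-1 sentinels) by a run-length encoding of the
-- tag column followed by a walk over the runs: a different algorithm, same O(n) cost.


-- ===== PORT A =====
-- the for-loop of A, with early return; `start`, `tag` are the loop state, `js` the
-- remaining range values.  sentence_array[j][1] is ported as pyGetD …, exact under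
-- Pre_ (every index j the loop reads satisfies -len ≤ j < len there).
def getAnnLoopA (arr : List (String × String)) (js : List Int) (start : Int) (tag : String) :
    Option Int × Option Int × Option String :=
  match js with
  | [] =>
      if start > -1 then (some start, some ((arr.length : Int) - 1), some tag)
      else (none, none, none)
  | j :: rest =>
      let sj := (PySem.List.pyGetD arr j ("", "")).2
      if start > -1 then
        if sj == tag then getAnnLoopA arr rest start tag
        else (some start, some (j - 1), some tag)
      else
        if !(sj == "") then getAnnLoopA arr rest j sj
        else getAnnLoopA arr rest start tag

def get_annotation (sentence_array : List (String × String)) (start_index : Int) :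
    Option Int × Option Int × Option String :=
  if start_index ≥ (sentence_array.length : Int) then (none, none, none)
  else getAnnLoopA sentence_array
        (PySem.List.pyRange start_index (sentence_array.length : Int) 1) (-1) ""

-- ===== PORT B =====
-- B's first loop: run-length encode the tag column into (tag, count) runs.  The Python
-- list `runs` is kept REVERSED here (head = youngest run), so Python's append / update
-- of runs[-1] becomes cons / update of the head — same values, exact transcription.
def rleStep (runs : List (String × Int)) (t : String) : List (String × Int) :=
  match runs with
  | (u, c) :: rest => if u == t then (u, c + 1) :: rest else (t, 1) :: (u, c) :: rest
  | [] => [(t, 1)]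

-- B's second loop: walk the runs front to back with state (i, pos), early return
def lookupRuns (runs : List (String × Int)) (i pos : Int) :
    Option Int × Option Int × Option String :=
  match runs with
  | [] => (none, none, none)
  | (tag, cnt) :: rest =>
      if pos + cnt > i then
        if !(tag == "") then (some i, some (pos + cnt - 1), some tag)
        else lookupRuns rest (pos + cnt) (pos + cnt)
      else lookupRuns rest i (pos + cnt)

def get_annotation_alt (sentence_array : List (String × String)) (start_index : Int) :
    Option Int × Option Int × Option String :=
  let runs := (sentence_array.foldl (fun acc p => rleStep acc p.2) []).reverse
  lookupRuns runs (max start_index 0) 0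

-- ===== PRECONDITION & SPEC =====
-- Pre_ excludes exactly the inputs where A raises IndexError: start_index < -len
-- (A's loop then reads sentence_array[start_index] out of range).
def Pre_get_annotation (sentence_array : List (String × String)) (start_index : Int) : Prop :=
  -(sentence_array.length : Int) ≤ start_index
instance (sentence_array : List (String × String)) (start_index : Int) : Decidable (Pre_get_annotation sentence_array start_index) := by unfold Pre_get_annotation; infer_instance

def pvWitness_get_annotation : (List (String × String)) × Int := ([("a", ""), ("b", "X")], 0)

def Spec_get_annotation (sentence_array : List (String × String)) (start_index : Int) (out : Option Int × Option Int × Option String) : Prop := out = get_annotation_alt sentence_array start_index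
instance (sentence_array : List (String × String)) (start_index : Int) (out : Option Int × Option Int × Option String) : Decidable (Spec_get_annotation sentence_array start_index out) := by unfold Spec_get_annotation; infer_instance

-- ===== CLAIM (what is proved, stated in full; the proofs are below) =====
def Claim_equal_get_annotation : Prop := ∀ (sentence_array : List (String × String)) (start_index : Int), Dom_get_annotation sentence_array start_index → Pre_get_annotation sentence_array start_index → Spec_get_annotation sentence_array start_index (get_annotation sentence_array start_index)

-- ===== LEMMAS AND PROOFS =====

-- proof-side name for B's run-length encoding of a tag column
def rleRuns (tags : List String) : List (String × Int) :=
  (tags.foldl rleStep []).reverse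

-- proof-side skip/extend characterization both ports are reduced to
def skipEmptyB (arr : List (String × String)) (n : Int) : Nat → Int → Int
  | 0, start => start
  | fuel + 1, start =>
      if start < n ∧ (PySem.List.pyGetD arr start ("", "")).2 == "" then
        skipEmptyB arr n fuel (start + 1)
      else start

def extendB (arr : List (String × String)) (n : Int) (tag : String) : Nat → Int → Int
  | 0, e => e
  | fuel + 1, e =>
      if e + 1 < n ∧ (PySem.List.pyGetD arr (e + 1) ("", "")).2 == tag then
        extendB arr n tag fuel (e + 1)
      else e

def altFrom (arr : List (String × String)) (si : Int) : Option Int × Option Int × Option String :=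
  if skipEmptyB arr (arr.length : Int) ((arr.length : Int) - si).toNat si ≥ (arr.length : Int) then
    (none, none, none)
  else
    (some (skipEmptyB arr (arr.length : Int) ((arr.length : Int) - si).toNat si),
     some (extendB arr (arr.length : Int)
             (PySem.List.pyGetD arr (skipEmptyB arr (arr.length : Int) ((arr.length : Int) - si).toNat si) ("", "")).2
             ((arr.length : Int) - (skipEmptyB arr (arr.length : Int) ((arr.length : Int) - si).toNat si + 1)).toNat
             (skipEmptyB arr (arr.length : Int) ((arr.length : Int) - si).toNat si)),
     some (PySem.List.pyGetD arr (skipEmptyB arr (arr.length : Int) ((arr.length : Int) - si).toNat si) ("", "")).2)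

-- ---- A-side: get_annotation = altFrom ∘ clamp ----

-- while `start ≤ -1`, A's loop state (start, tag) is irrelevant: only an index j with a
-- nonempty tag can set `start > -1`, and there both state components are overwritten
theorem neg_state (arr : List (String × String)) (js : List Int) :
    ∀ (start : Int) (tag : String) (start' : Int) (tag' : String),
      start ≤ -1 → start' ≤ -1 →
      getAnnLoopA arr js start tag = getAnnLoopA arr js start' tag' := by
  induction js with
  | nil =>
      intro start tag start' tag' h h'
      simp only [getAnnLoopA]
      rw [if_neg (show ¬ start > -1 by omega), if_neg (show ¬ start' > -1 by omega)]
  | cons j rest ih =>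
      intro start tag start' tag' h h'
      simp only [getAnnLoopA]
      rw [if_neg (show ¬ start > -1 by omega), if_neg (show ¬ start' > -1 by omega)]
      by_cases hj : ((PySem.List.pyGetD arr j ("", "")).2 == "") = true
      · rw [hj]
        simp only [Bool.not_true]
        rw [if_neg (by simp), if_neg (by simp)]
        exact ih start tag start' tag' h h'
      · simp only [Bool.not_eq_true] at hj
        rw [hj]
        simp only [Bool.not_false]
        rw [if_pos trivial, if_pos trivial]

-- a negative leading range value is a no-op for A's loop (the state stays ≤ -1)
theorem loopA_neg_step (arr : List (String × String)) (si : Int) (hsi : si < 0) :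
    getAnnLoopA arr (PySem.List.pyRange si (arr.length : Int) 1) (-1) "" =
    getAnnLoopA arr (PySem.List.pyRange (si + 1) (arr.length : Int) 1) (-1) "" := by
  rw [PySem.List.pyRange_one_cons (by omega : si < (arr.length : Int))]
  simp only [getAnnLoopA]
  rw [if_neg (show ¬ (-1 : Int) > -1 by omega)]
  by_cases hj : ((PySem.List.pyGetD arr si ("", "")).2 == "") = true
  · rw [hj]
    simp only [Bool.not_true]
    rw [if_neg (by simp)]
  · simp only [Bool.not_eq_true] at hj
    rw [hj]
    simp only [Bool.not_false]
    rw [if_pos trivial]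
    exact neg_state _ _ si _ (-1) "" (by omega) (by omega)

-- A ignores the negative part of the range: starting below 0 equals starting at 0
theorem loopA_clamp (arr : List (String × String)) (si : Int) (hsi : si ≤ 0) :
    getAnnLoopA arr (PySem.List.pyRange si (arr.length : Int) 1) (-1) "" =
    getAnnLoopA arr (PySem.List.pyRange 0 (arr.length : Int) 1) (-1) "" := by
  by_cases h0 : si = 0
  · rw [h0]
  · rw [loopA_neg_step arr si (by omega)]
    exact loopA_clamp arr (si + 1) (by omega)
termination_by (-si).toNat
decreasing_by omega

-- phase 2: once `start > -1` holds with tag `tag`, the rest of A's loop computes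
-- exactly the extend loop (e is the current end of the run)
theorem loopA_extend (arr : List (String × String)) (s : Int) (tag : String)
    (hs : s > -1) :
    ∀ e : Int, s ≤ e → e < (arr.length : Int) →
      getAnnLoopA arr (PySem.List.pyRange (e + 1) (arr.length : Int) 1) s tag =
        (some s, some (extendB arr (arr.length : Int) tag
                         ((arr.length : Int) - (e + 1)).toNat e), some tag) := by
  intro e hse he
  by_cases hend : e + 1 < (arr.length : Int)
  · have hfuel : ((arr.length : Int) - (e + 1)).toNat
        = ((arr.length : Int) - (e + 2)).toNat + 1 := by omega
    rw [hfuel, PySem.List.pyRange_one_cons hend]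
    simp only [getAnnLoopA, extendB]
    rw [if_pos (show s > -1 from hs)]
    by_cases hj : ((PySem.List.pyGetD arr (e + 1) ("", "")).2 == tag) = true
    · rw [if_pos hj, if_pos (And.intro hend hj)]
      have hrec := loopA_extend arr s tag hs (e + 1) (by omega) (by omega)
      rw [show (e : Int) + 2 = e + 1 + 1 by ring]
      exact hrec
    · rw [if_neg (by simp [hj]), if_neg (by tauto)]
      rw [show e + 1 - 1 = e by ring]
  · have hfuel : ((arr.length : Int) - (e + 1)).toNat = 0 := by omega
    rw [hfuel, PySem.List.pyRange_one_eq_nil (by omega)]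
    simp only [getAnnLoopA, extendB]
    rw [if_pos (show s > -1 from hs)]
    have : (arr.length : Int) - 1 = e := by omega
    rw [this]
termination_by e => ((arr.length : Int) - e).toNat
decreasing_by omega

-- phase 1: from a nonnegative index, A's loop equals the skip-then-extend composition
theorem loopA_skip (arr : List (String × String)) :
    ∀ si : Int, 0 ≤ si →
      getAnnLoopA arr (PySem.List.pyRange si (arr.length : Int) 1) (-1) "" = altFrom arr si := by
  intro si hsi
  by_cases hlt : si < (arr.length : Int)
  · have hfuel : ((arr.length : Int) - si).toNat
        = ((arr.length : Int) - (si + 1)).toNat + 1 := by omega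
    rw [PySem.List.pyRange_one_cons hlt]
    simp only [getAnnLoopA]
    rw [if_neg (show ¬ (-1 : Int) > -1 by omega)]
    by_cases hj : ((PySem.List.pyGetD arr si ("", "")).2 == "") = true
    · rw [hj]
      simp only [Bool.not_true]
      rw [if_neg (by simp)]
      have hskip : skipEmptyB arr (arr.length : Int) ((arr.length : Int) - si).toNat si
          = skipEmptyB arr (arr.length : Int) ((arr.length : Int) - (si + 1)).toNat (si + 1) := by
        rw [hfuel]
        simp only [skipEmptyB]
        rw [if_pos (And.intro hlt hj)]
      rw [loopA_skip arr (si + 1) (by omega)]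
      unfold altFrom
      rw [hskip]
    · simp only [Bool.not_eq_true] at hj
      rw [hj]
      simp only [Bool.not_false]
      rw [if_pos trivial]
      have hskip : skipEmptyB arr (arr.length : Int) ((arr.length : Int) - si).toNat si = si := by
        rw [hfuel]
        simp only [skipEmptyB]
        rw [if_neg (by simp [hj])]
      unfold altFrom
      rw [hskip]
      rw [if_neg (show ¬ si ≥ (arr.length : Int) by omega)]
      exact loopA_extend arr si ((PySem.List.pyGetD arr si ("", "")).2) (by omega) si le_rfl hlt
  · have hfuel : ((arr.length : Int) - si).toNat = 0 := by omega
    rw [PySem.List.pyRange_one_eq_nil (by omega)]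
    simp only [getAnnLoopA]
    rw [if_neg (show ¬ (-1 : Int) > -1 by omega)]
    unfold altFrom
    rw [hfuel]
    simp only [skipEmptyB]
    rw [if_pos (by omega)]
termination_by si => ((arr.length : Int) - si).toNat
decreasing_by omega

-- ---- B-side: get_annotation_alt = altFrom ∘ clamp ----

theorem rleStep_ne_nil (acc : List (String × Int)) (t : String) : rleStep acc t ≠ [] := by
  unfold rleStep
  match acc with
  | [] => simp
  | (u, c) :: rest => by_cases h : (u == t) = true <;> simp [h]

-- a nonempty stack below the top is frozen by the fold
theorem foldl_rleStep_append (ts : List String) :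
    ∀ (acc₁ acc₂ : List (String × Int)), acc₁ ≠ [] →
      List.foldl rleStep (acc₁ ++ acc₂) ts = List.foldl rleStep acc₁ ts ++ acc₂ := by
  induction ts with
  | nil => intro acc₁ acc₂ h; simp
  | cons t ts ih =>
      intro acc₁ acc₂ h
      have hstep : rleStep (acc₁ ++ acc₂) t = rleStep acc₁ t ++ acc₂ := by
        match acc₁ with
        | [] => exact absurd rfl h
        | (u, c) :: rest => by_cases hu : (u == t) = true <;> simp [rleStep, hu]
      simp only [List.foldl_cons, hstep]
      exact ih (rleStep acc₁ t) acc₂ (rleStep_ne_nil acc₁ t)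

-- once the next tag differs from the top of the stack, the whole stack is frozen
theorem foldl_rleStep_frozen (ts : List String) (y : String × Int) (acc : List (String × Int))
    (hh : ∀ u, ts.head? = some u → (u == y.1) = false) :
    List.foldl rleStep (y :: acc) ts = List.foldl rleStep [] ts ++ y :: acc := by
  match ts with
  | [] => simp
  | t :: ts' =>
      have ht : (t == y.1) = false := hh t rfl
      have hstep : rleStep (y :: acc) t = (t, 1) :: y :: acc := by
        obtain ⟨u, c⟩ := y
        simp only [rleStep]
        rw [if_neg (by
          simp only [beq_eq_false_iff_ne] at ht
          simp only [beq_iff_eq]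
          exact fun hc => ht hc.symm)]
      have hstep0 : List.foldl rleStep [] (t :: ts') = List.foldl rleStep [(t, 1)] ts' := rfl
      simp only [List.foldl_cons, hstep, hstep0]
      have := foldl_rleStep_append ts' [(t, 1)] (y :: acc) (by simp)
      simpa using this

-- merging a replicate block into the top run
theorem foldl_rleStep_replicate (k : Nat) :
    ∀ (t : String) (c : Int) (ts : List String),
      List.foldl rleStep [(t, c)] (List.replicate k t ++ ts) =
      List.foldl rleStep [(t, c + k)] ts := by
  induction k with
  | zero => intro t c ts; simp
  | succ k ih =>
      intro t c ts
      have hc : c + ((k + 1 : Nat) : Int) = (c + 1) + (k : Int) := by push_cast; ring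
      simp only [List.replicate_succ, List.cons_append, List.foldl_cons]
      have hstep : rleStep [(t, c)] t = [(t, c + 1)] := by simp [rleStep]
      rw [hstep, ih t (c + 1) ts, hc]

-- first-run decomposition of rleRuns
theorem rleRuns_cons (t : String) (rest : List String) :
    rleRuns (t :: rest) =
      (t, ((rest.takeWhile (· == t)).length : Int) + 1) ::
        rleRuns (rest.dropWhile (· == t)) := by
  have hsplit : t :: rest =
      List.replicate ((rest.takeWhile (· == t)).length + 1) t ++ rest.dropWhile (· == t) := by
    have htw : rest.takeWhile (· == t) = List.replicate (rest.takeWhile (· == t)).length t := by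
      apply List.eq_replicate_of_mem
      intro b hb
      have := List.mem_takeWhile_imp hb
      simpa [beq_iff_eq] using this
    calc t :: rest = t :: (rest.takeWhile (· == t) ++ rest.dropWhile (· == t)) := by
              rw [List.takeWhile_append_dropWhile]
      _ = _ := by rw [List.replicate_succ, htw]; simp
  have hhead : ∀ u, (rest.dropWhile (· == t)).head? = some u → (u == t) = false := by
    intro u hu
    have := List.head?_dropWhile_not (p := (· == t)) rest
    rw [hu] at this
    simpa using this
  unfold rleRuns
  conv_lhs => rw [hsplit]
  have h1 : List.foldl rleStep [] (List.replicate ((rest.takeWhile (· == t)).length + 1) t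
      ++ rest.dropWhile (· == t)) =
      List.foldl rleStep [(t, 1)] (List.replicate ((rest.takeWhile (· == t)).length) t
      ++ rest.dropWhile (· == t)) := by
    rw [List.replicate_succ]; rfl
  rw [h1, foldl_rleStep_replicate]
  rw [foldl_rleStep_frozen _ (t, 1 + ((rest.takeWhile (· == t)).length : Int)) [] hhead]
  simp [add_comm]

-- the tag of arr at a valid absolute position j, read through the tag column
theorem tag_eq_col (arr : List (String × String)) (j : Int) (h0 : 0 ≤ j)
    (hj : j < (arr.length : Int)) :
    (PySem.List.pyGetD arr j ("", "")).2 = (arr.map Prod.snd).getD j.toNat "" := by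
  rw [PySem.List.pyGetD_of_nonneg arr _ h0]
  have hjl : j.toNat < arr.length := by omega
  rw [List.getD_eq_getElem _ _ hjl, List.getD_eq_getElem _ _ (by simpa using hjl)]
  simp

-- skip loop: stops immediately on a nonempty tag (or out of range)
theorem skip_stop (arr : List (String × String)) (n : Int) (fuel : Nat) (i : Int)
    (h : ¬ (i < n ∧ ((PySem.List.pyGetD arr i ("", "")).2 == "") = true)) :
    skipEmptyB arr n fuel i = i := by
  cases fuel with
  | zero => rfl
  | succ fuel => simp only [skipEmptyB]; rw [if_neg h]

-- altFrom is invariant under skipping one leading empty-tagged position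
theorem altFrom_step (arr : List (String × String)) (i : Int) (hi : i < (arr.length : Int))
    (he : ((PySem.List.pyGetD arr i ("", "")).2 == "") = true) :
    altFrom arr i = altFrom arr (i + 1) := by
  have hfuel : ((arr.length : Int) - i).toNat = ((arr.length : Int) - (i + 1)).toNat + 1 := by
    omega
  unfold altFrom
  rw [hfuel]
  simp only [skipEmptyB]
  rw [if_pos (And.intro hi he)]

-- altFrom is invariant under skipping a block of empty-tagged positions
theorem altFrom_block (arr : List (String × String)) (m : Nat) :
    ∀ i : Int, (∀ j : Int, i ≤ j → j < i + m →
        j < (arr.length : Int) ∧ ((PySem.List.pyGetD arr j ("", "")).2 == "") = true) →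
      altFrom arr i = altFrom arr (i + m) := by
  induction m with
  | zero => intro i _; simp
  | succ m ih =>
      intro i h
      have h0 := h i le_rfl (by push_cast; omega)
      rw [altFrom_step arr i h0.1 h0.2]
      have := ih (i + 1) (by
        intro j hj1 hj2
        exact h j (by omega) (by push_cast at hj2 ⊢; omega))
      rw [this]
      congr 1
      push_cast
      ring

-- extend loop: over a run of tag t ending (inclusively) at position m-1 it returns m-1
theorem extend_run (arr : List (String × String)) (t : String) (m : Int)
    (hm : m ≤ (arr.length : Int))
    (hstop : m = (arr.length : Int) ∨ ((PySem.List.pyGetD arr m ("", "")).2 == t) = false) :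
    ∀ e : Int, e < m →
      (∀ j : Int, e < j → j < m → ((PySem.List.pyGetD arr j ("", "")).2 == t) = true) →
      extendB arr (arr.length : Int) t ((arr.length : Int) - (e + 1)).toNat e = m - 1 := by
  intro e he hrun
  by_cases hlast : e + 1 < m
  · have hfuel : ((arr.length : Int) - (e + 1)).toNat
        = ((arr.length : Int) - (e + 2)).toNat + 1 := by omega
    rw [hfuel]
    simp only [extendB]
    rw [if_pos (And.intro (by omega) (hrun (e + 1) (by omega) hlast))]
    have := extend_run arr t m hm hstop (e + 1) (by omega)
      (fun j hj1 hj2 => hrun j (by omega) hj2)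
    rw [show (e : Int) + 2 = e + 1 + 1 by ring]
    exact this
  · have hme : m = e + 1 := by omega
    have hcond : ¬ (e + 1 < (arr.length : Int) ∧
        ((PySem.List.pyGetD arr (e + 1) ("", "")).2 == t) = true) := by
      rcases hstop with h | h
      · omega
      · rw [← hme]; intro hc; rw [h] at hc; exact absurd hc.2 (by simp)
    cases hfc : ((arr.length : Int) - (e + 1)).toNat with
    | zero => simp only [extendB]; omega
    | succ f => simp only [extendB]; rw [if_neg hcond]; omega
termination_by e => (m - e).toNat
decreasing_by omega

-- reading arr's tag at absolute position pos+j through the column suffix S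
theorem tag_suffix (arr : List (String × String)) (pos : Int) (hpos : 0 ≤ pos)
    (S : List String) (hS : S = (arr.map Prod.snd).drop pos.toNat)
    (j : Nat) (hj : j < S.length) :
    (PySem.List.pyGetD arr (pos + (j : Int)) ("", "")).2 = S.getD j "" := by
  subst hS
  simp only [List.length_drop, List.length_map] at hj
  rw [tag_eq_col arr (pos + (j : Int)) (by omega) (by omega)]
  have hidx : (pos + (j : Int)).toNat = pos.toNat + j := by omega
  rw [hidx]
  simp [List.getD_eq_getElem?_getD, List.getElem?_drop]

-- MAIN: walking the runs of the tag-column suffix starting at pos computes altFrom at i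
theorem lookup_eq_altFrom (S : List String) :
    ∀ (arr : List (String × String)) (pos i : Int), 0 ≤ pos → pos ≤ i →
      S = (arr.map Prod.snd).drop pos.toNat →
      lookupRuns (rleRuns S) i pos = altFrom arr i := by
  match S with
  | [] =>
      intro arr pos i hpos hpi hS
      have hlen : arr.length ≤ pos.toNat := by
        have := congrArg List.length hS
        simp [List.length_drop] at this
        omega
      simp only [rleRuns, List.foldl_nil, List.reverse_nil, lookupRuns]
      unfold altFrom
      rw [show ((arr.length : Int) - i).toNat = 0 by omega]
      simp only [skipEmptyB]
      rw [if_pos (by omega)]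
  | t :: rest =>
      intro arr pos i hpos hpi hS
      have hlenS : (t :: rest).length = arr.length - pos.toNat := by
        have := congrArg List.length hS
        simpa [List.length_drop] using this
      have hposlt : pos.toNat < arr.length := by simp at hlenS; omega
      set k := (rest.takeWhile (· == t)).length with hk
      set S' := rest.dropWhile (· == t) with hS'def
      have htw : rest.takeWhile (· == t) = List.replicate k t := by
        apply List.eq_replicate_of_mem
        intro b hb
        simpa [beq_iff_eq] using List.mem_takeWhile_imp hb
      have hsplit : t :: rest = List.replicate (k + 1) t ++ S' := by
        calc t :: rest = t :: (rest.takeWhile (· == t) ++ rest.dropWhile (· == t)) := by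
              rw [List.takeWhile_append_dropWhile]
          _ = _ := by rw [List.replicate_succ, htw]; simp [hS'def]
      have hkS : k + 1 ≤ (t :: rest).length := by
        rw [hsplit]; simp
      have hc1le : pos + ((k : Int) + 1) ≤ (arr.length : Int) := by
        simp only [List.length_cons] at hlenS hkS
        omega
      -- every position pos ≤ j < pos+k+1 carries tag t
      have hcol : ∀ j : Int, pos ≤ j → j < pos + ((k : Int) + 1) →
          (PySem.List.pyGetD arr j ("", "")).2 = t := by
        intro j hj1 hj2
        have hoff : (j - pos).toNat < k + 1 := by omega
        have hofflt : (j - pos).toNat < (t :: rest).length := by omega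
        have := tag_suffix arr pos hpos (t :: rest) hS (j - pos).toNat hofflt
        rw [show pos + (((j - pos).toNat : Nat) : Int) = j by omega] at this
        rw [this, hsplit]
        rw [List.getD_append _ _ _ _ (by simpa using hoff)]
        simp [List.getD_eq_getElem?_getD, hoff]
      -- at position pos+k+1 the run stops: end of array, or a different tag
      have hstop : pos + ((k : Int) + 1) = (arr.length : Int) ∨
          ((PySem.List.pyGetD arr (pos + ((k : Int) + 1)) ("", "")).2 == t) = false := by
        by_cases hnil : S' = []
        · left
          have : (t :: rest).length = k + 1 := by rw [hsplit, hnil]; simp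
          simp only [List.length_cons] at hlenS this
          omega
        · right
          obtain ⟨u, S'', hu⟩ := List.exists_cons_of_ne_nil hnil
          have hS'lt : k + 1 < (t :: rest).length := by
            rw [hsplit, hu]
            simp
          have htag := tag_suffix arr pos hpos (t :: rest) hS (k + 1) hS'lt
          rw [show pos + (((k + 1 : Nat) : Nat) : Int) = pos + ((k : Int) + 1) by push_cast; ring]
            at htag
          rw [htag, hsplit]
          rw [List.getD_append_right _ _ _ _ (by simp)]
          have hune : (u == t) = false := by
            have := List.head?_dropWhile_not (p := (· == t)) rest
            rw [← hS'def, hu] at this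
            simpa using this
          simpa [hu] using hune
      have hhead' : ∀ u, S'.head? = some u → (u == t) = false := by
        intro u hu
        have := List.head?_dropWhile_not (p := (· == t)) rest
        rw [← hS'def, hu] at this
        simpa using this
      have hrle : rleRuns (t :: rest) = (t, (k : Int) + 1) :: rleRuns S' := rleRuns_cons t rest
      have hSdrop : S' = (arr.map Prod.snd).drop (pos + ((k : Int) + 1)).toNat := by
        have h1 : (pos + ((k : Int) + 1)).toNat = pos.toNat + (k + 1) := by omega
        have h2 := List.drop_drop (l := arr.map Prod.snd) (i := k + 1) (j := pos.toNat)
        rw [h1, ← h2, ← hS, hsplit]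
        simp
      rw [hrle]
      simp only [lookupRuns]
      by_cases hin : pos + ((k : Int) + 1) > i
      · rw [if_pos hin]
        by_cases hte : (t == "") = true
        · rw [hte]
          simp only [Bool.not_true]
          rw [if_neg (by simp)]
          have hIH := lookup_eq_altFrom S' arr (pos + ((k : Int) + 1)) (pos + ((k : Int) + 1))
            (by omega) le_rfl hSdrop
          rw [hIH]
          have hm : pos + ((k : Int) + 1) = i + ((pos + ((k : Int) + 1) - i).toNat : Int) := by
            omega
          rw [hm]
          refine (altFrom_block arr ((pos + ((k : Int) + 1) - i).toNat) i ?_).symm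
          intro j hj1 hj2
          have hj2' : j < pos + ((k : Int) + 1) := by omega
          refine ⟨by omega, ?_⟩
          rw [hcol j (by omega) hj2']
          exact hte
        · have hte' : (t == "") = false := by simpa using hte
          rw [hte']
          simp only [Bool.not_false]
          rw [if_pos trivial]
          -- altFrom at i: skip stops at i, tag is t, extend reaches pos+k
          have htagi : (PySem.List.pyGetD arr i ("", "")).2 = t := hcol i hpi (by omega)
          have hskip : skipEmptyB arr (arr.length : Int) ((arr.length : Int) - i).toNat i = i := by
            apply skip_stop
            intro hc
            rw [htagi, hte'] at hc
            exact absurd hc.2 (by simp)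
          unfold altFrom
          rw [hskip]
          rw [if_neg (by omega)]
          rw [htagi]
          have hext := extend_run arr t (pos + ((k : Int) + 1)) hc1le
            (by
              rcases hstop with h | h
              · exact Or.inl h
              · exact Or.inr h)
            i (by omega)
            (fun j hj1 hj2 => by rw [hcol j (by omega) hj2]; simp)
          rw [hext]
      · rw [if_neg hin]
        exact lookup_eq_altFrom S' arr (pos + ((k : Int) + 1)) i (by omega) (by omega) hSdrop
termination_by S.length
decreasing_by
  all_goals
    simp only [List.length_cons]
    have := List.length_dropWhile_le (p := (· == t)) rest
    omega

-- B's port equals the skip/extend characterization at the clamped start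
theorem alt_eq_altFrom (arr : List (String × String)) (si : Int) :
    get_annotation_alt arr si = altFrom arr (max si 0) := by
  unfold get_annotation_alt
  have hfold : arr.foldl (fun acc p => rleStep acc p.2) [] =
      (arr.map Prod.snd).foldl rleStep [] := by
    rw [List.foldl_map]
  simp only [hfold]
  have : ((arr.map Prod.snd).foldl rleStep []).reverse = rleRuns (arr.map Prod.snd) := rfl
  rw [this]
  exact lookup_eq_altFrom (arr.map Prod.snd) arr 0 (max si 0) le_rfl (by omega) (by simp)

-- ===== VERDICT (by name: the statement is the Claim_ definition above) =====
theorem get_annotation_spec : Claim_equal_get_annotation := by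
  intro arr si _ hpre
  unfold Spec_get_annotation get_annotation
  rw [alt_eq_altFrom]
  by_cases hge : si ≥ (arr.length : Int)
  · rw [if_pos hge]
    have hmax : max si 0 = si := by omega
    have hfuel : ((arr.length : Int) - si).toNat = 0 := by omega
    unfold altFrom
    rw [hmax, hfuel]
    simp only [skipEmptyB]
    rw [if_pos (by omega)]
  · rw [if_neg hge]
    by_cases hneg : si < 0
    · rw [loopA_clamp arr si (by omega), loopA_skip arr 0 le_rfl]
      have : max si 0 = 0 := by omega
      rw [this]
    · rw [loopA_skip arr si (by omega)]
      have : max si 0 = si := by omega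
      rw [this]
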